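-- pv_equiv track=rewrite | github.com/chrismeyers/advent-of-code | 2022/day06/solutions.py | _solve
-- ===== SOURCE A (Python) =====
-- from collections import Counter
--
-- def _solve(data, num_distinct):
--     chars_processed = 0
--
--     for i, _ in enumerate(data):
--         current = data[i : i + num_distinct]
--         counts = Counter(current)
--
--         if len(counts) == num_distinct:
--             chars_processed = i + num_distinct
--             break
--
--     return chars_processed
-- ===== SOURCE B (Python) =====
-- def _solve(data, num_distinct):
--     if num_distinct <= 0:
--         return 0
--     k = num_distinct
--     counts = {}
--     distinct = 0
--     for j, c in enumerate(data):
--         counts[c] = counts.get(c, 0) + 1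
--         if counts[c] == 1:
--             distinct += 1
--         if k <= j:
--             d = data[j - k]
--             counts[d] = counts[d] - 1
--             if counts[d] == 0:
--                 distinct -= 1
--         if k <= j + 1 and distinct == k:
--             return j + 1
--     return 0
-- ===== Notes on version B (the rewrite author's own statement) =====
-- stated objective: faster
-- what changed: Replaces the per-index rebuild of a Counter over each length-k slice with a single sliding-window pass maintaining incremental character counts and a distinct-count, so no slice or Counter is built per position.
import Mathlib
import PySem

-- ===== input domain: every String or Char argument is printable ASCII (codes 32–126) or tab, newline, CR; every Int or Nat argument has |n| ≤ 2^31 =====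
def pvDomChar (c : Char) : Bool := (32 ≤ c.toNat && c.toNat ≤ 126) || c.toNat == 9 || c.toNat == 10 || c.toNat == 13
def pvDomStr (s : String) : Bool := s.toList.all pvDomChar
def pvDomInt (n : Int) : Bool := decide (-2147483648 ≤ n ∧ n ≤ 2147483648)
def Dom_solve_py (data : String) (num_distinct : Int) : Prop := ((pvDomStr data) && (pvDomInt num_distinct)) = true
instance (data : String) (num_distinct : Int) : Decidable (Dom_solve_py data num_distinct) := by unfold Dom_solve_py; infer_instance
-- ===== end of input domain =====

-- B replaces A's per-index slice-and-Counter scan (O(n*k)) by one sliding-window pass with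
-- incremental character counts and a running distinct-count (O(n)); same return value everywhere.

-- ===== PORT A =====
-- for i, _ in enumerate(data): current = data[i:i+num_distinct]; counts = Counter(current);
-- if len(counts) == num_distinct: return i + num_distinct   (break + return chars_processed)
def solveALoop (l : List Char) (k : Int) (i : Nat) : Int :=
  if i < l.length then
    let current := PySem.List.slice l (some (i : Int)) (some ((i : Int) + k))
    let counts := PySem.Dict.counter current
    if (counts.size : Int) = k then (i : Int) + k else solveALoop l k (i + 1)
  else 0
termination_by l.length - i

def solve_py (data : String) (num_distinct : Int) : Int :=
  solveALoop data.toList num_distinct 0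

-- ===== PORT B =====
-- sliding window: counts[c] += 1; if counts[c]==1: distinct += 1; if k <= j: decrement the
-- char leaving the window (data[j-k]); if k <= j+1 and distinct == k: return j + 1
def solveBLoop (l : List Char) (k : Nat) (j : Nat) (counts : PySem.Dict Char Int) (distinct : Int) : Int :=
  if h : j < l.length then
    let c := l[j]
    let counts1 := counts.insert c (counts.getD c 0 + 1)
    let distinct1 := if counts1.getD c 0 = 1 then distinct + 1 else distinct
    let st :=
      if k ≤ j then
        let d := l[j - k]'(by omega)
        let counts2 := counts1.insert d (counts1.getD d 0 - 1)
        (counts2, if counts2.getD d 0 = 0 then distinct1 - 1 else distinct1)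
      else (counts1, distinct1)
    if k ≤ j + 1 ∧ st.2 = (k : Int) then (j : Int) + 1
    else solveBLoop l k (j + 1) st.1 st.2
  else 0
termination_by l.length - j

def solve_py_alt (data : String) (num_distinct : Int) : Int :=
  if num_distinct ≤ 0 then 0
  else solveBLoop data.toList num_distinct.toNat 0 PySem.Dict.empty 0

-- ===== PRECONDITION & SPEC =====
def Spec_solve_py (data : String) (num_distinct : Int) (out : Int) : Prop := out = solve_py_alt data num_distinct
instance (data : String) (num_distinct : Int) (out : Int) : Decidable (Spec_solve_py data num_distinct out) := by unfold Spec_solve_py; infer_instance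

-- ===== CLAIM (what is proved, stated in full; the proofs are below) =====
def Claim_equal_solve_py : Prop := ∀ (data : String) (num_distinct : Int), Dom_solve_py data num_distinct → Spec_solve_py data num_distinct (solve_py data num_distinct)

-- ===== LEMMAS AND PROOFS =====

-- the window B maintains just before processing index j: the last min(j,k) chars of l.take j
def pvWin (l : List Char) (k j : Nat) : List Char := (l.take j).drop (j - k)

-- A's test at index i is "the k-slice at i has k distinct chars"
lemma pvCounterSize (cur : List Char) :
    (PySem.Dict.counter cur).size = cur.toFinset.card := by
  have h1 : (PySem.Dict.counter cur).size = (PySem.Dict.counter cur).keys.length := by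
    simp [PySem.Dict.size, PySem.Dict.keys]
  rw [h1, PySem.Dict.keys_counter]
  have hnd := PySem.Set.nodup_ofList (xs := cur)
  rw [← List.toFinset_card_of_nodup hnd]
  congr 1
  ext x
  simp [PySem.Set.mem_ofList]

-- A's loop returns 0 when num_distinct is negative (no counter has negative size)
lemma solveALoop_neg (l : List Char) (k : Int) (hk : k < 0) :
    ∀ i, solveALoop l k i = 0 := by
  intro i
  induction hn : l.length - i using Nat.strong_induction_on generalizing i with
  | _ n ih =>
    unfold solveALoop
    split
    · rw [if_neg (by intro hc; omega)]
      exact ih (l.length - (i+1)) (by omega) (i+1) rfl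
    · rfl

-- A's loop returns 0 once every remaining window is shorter than k
lemma solveALoop_tail (l : List Char) (K : Nat) (_hK : 0 < K) :
    ∀ i, l.length < i + K → solveALoop l (K : Int) i = 0 := by
  intro i
  induction hn : l.length - i using Nat.strong_induction_on generalizing i with
  | _ n ih =>
    intro hi
    unfold solveALoop
    split
    · next h =>
      rw [PySem.List.slice_natCast_add]
      have hne : ¬ (((PySem.Dict.counter ((l.drop i).take K)).size : Int) = (K : Int)) := by
        intro hc
        have hs := pvCounterSize ((l.drop i).take K)
        have hcard : ((l.drop i).take K).toFinset.card = K := by exact_mod_cast hs ▸ hc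
        have hfle := List.toFinset_card_le ((l.drop i).take K)
        have hlen : ((l.drop i).take K).length < K := by
          rw [List.length_take, List.length_drop]; omega
        omega
      rw [if_neg hne]
      exact ih (l.length - (i+1)) (by omega) (i+1) rfl (by omega)
    · rfl

-- window shift, before the window is full (j < K): just append l[j]
lemma pvTake_succ (l : List Char) (j : Nat) (h : j < l.length) :
    l.take (j+1) = l.take j ++ [l[j]] := by
  rw [List.take_add_one, List.getElem?_eq_getElem h]
  rfl

lemma pvWin_succ_lt (l : List Char) (K j : Nat) (h : j < l.length) (hj : j < K) :
    pvWin l K (j+1) = pvWin l K j ++ [l[j]] := by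
  unfold pvWin
  rw [show j+1-K = 0 by omega, show j-K = 0 by omega, List.drop_zero, List.drop_zero]
  exact pvTake_succ l j h

-- window shift, full window (K ≤ j): drop l[j-K] at the front, append l[j]
lemma pvWin_succ_ge (l : List Char) (K j : Nat) (h : j < l.length) (hK : 0 < K) (hj : K ≤ j) :
    (l[j - K]'(by omega)) :: pvWin l K (j+1) = pvWin l K j ++ [l[j]] := by
  unfold pvWin
  have hlt : (l.take j).length = j := by rw [List.length_take]; omega
  rw [pvTake_succ l j h, List.drop_append_of_le_length (by omega)]
  rw [← List.cons_append]
  congr 1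
  have h2 : j - K < (l.take j).length := by omega
  rw [List.drop_eq_getElem_cons h2]
  congr 1
  · simp [List.getElem_take]
  · congr 1
    omega

-- the slice A inspects at index i = j+1-K IS B's window after step j
lemma pvWin_eq_slice (l : List Char) (K j : Nat) (hK : K ≤ j + 1) :
    pvWin l K (j+1) = (l.drop (j + 1 - K)).take K := by
  unfold pvWin
  rw [List.drop_take]
  congr 1
  omega

-- card of toFinset after appending / consing
lemma pvCard_cons (w : List Char) (d : Char) :
    (d :: w).toFinset.card = w.toFinset.card + (if d ∈ w then 0 else 1) := by
  rw [List.toFinset_cons, Finset.card_insert_eq_ite]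
  by_cases hd : d ∈ w <;> simp [hd]

lemma pvCard_append (w : List Char) (c : Char) :
    (w ++ [c]).toFinset.card = w.toFinset.card + (if c ∈ w then 0 else 1) := by
  have : (w ++ [c]).toFinset = (c :: w).toFinset := by
    ext x; simp
  rw [this, pvCard_cons]

-- MAIN: B's loop with a state describing the window pvWin l K j equals A's loop from index j+1-K
lemma solveBLoop_eq (l : List Char) (K : Nat) (hK : 0 < K) :
    ∀ j counts distinct,
    (∀ c, PySem.Dict.getD counts c 0 = ((pvWin l K j).count c : Int)) →
    distinct = ((pvWin l K j).toFinset.card : Int) →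
    solveBLoop l K j counts distinct = solveALoop l (K : Int) (j + 1 - K) := by
  intro j
  induction hn : l.length - j using Nat.strong_induction_on generalizing j with
  | _ n ih =>
    intro counts distinct hcnt hdst
    by_cases h : j < l.length
    case neg =>
      rw [solveBLoop, dif_neg h, solveALoop_tail l K hK _ (by omega)]
    case pos =>
      rw [solveBLoop, dif_pos h]
      set c := l[j] with hc
      set w := pvWin l K j with hw
      set w' := pvWin l K (j+1) with hw'
      -- counts after the increment: counts of w ++ [c]
      have hc1 : ∀ x, PySem.Dict.getD (PySem.Dict.insert counts c (PySem.Dict.getD counts c 0 + 1)) x 0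
          = (((w ++ [c]).count x : Nat) : Int) := by
        intro x
        rw [PySem.Dict.getD_insert]
        by_cases hx : x = c
        · rw [if_pos hx, hcnt c, hx]
          simp [List.count_append]
        · rw [if_neg hx, hcnt x]
          simp [List.count_append, List.count_singleton]
          exact fun hh => hx hh.symm
      -- distinct after the increment: distinct chars of w ++ [c]
      have hcc : (w ++ [c]).count c = w.count c + 1 := by simp
      have hd1 : (if PySem.Dict.getD (PySem.Dict.insert counts c (PySem.Dict.getD counts c 0 + 1)) c 0 = 1
            then distinct + 1 else distinct) = (((w ++ [c]).toFinset.card : Nat) : Int) := by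
        rw [hc1 c, hdst, pvCard_append, hcc]
        by_cases hcw : c ∈ w
        · have h1 : 0 < w.count c := List.count_pos_iff.mpr hcw
          have hne : ¬ (((w.count c + 1 : Nat) : Int) = 1) := by omega
          rw [if_neg hne, if_pos hcw]
          push_cast; ring
        · have h0 : w.count c = 0 := List.count_eq_zero.mpr hcw
          have hpos : ((w.count c + 1 : Nat) : Int) = 1 := by omega
          rw [if_pos hpos, if_neg hcw]
          push_cast; ring
      -- the state after the (conditional) decrement describes the new window w'
      have hstep : ∀ st : PySem.Dict Char Int × Int,
          st = (if K ≤ j then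
                  (PySem.Dict.insert (PySem.Dict.insert counts c (PySem.Dict.getD counts c 0 + 1)) (l[j-K]'(by omega))
                     (PySem.Dict.getD (PySem.Dict.insert counts c (PySem.Dict.getD counts c 0 + 1)) (l[j-K]'(by omega)) 0 - 1),
                   if PySem.Dict.getD (PySem.Dict.insert (PySem.Dict.insert counts c (PySem.Dict.getD counts c 0 + 1)) (l[j-K]'(by omega))
                        (PySem.Dict.getD (PySem.Dict.insert counts c (PySem.Dict.getD counts c 0 + 1)) (l[j-K]'(by omega)) 0 - 1)) (l[j-K]'(by omega)) 0 = 0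
                   then (if PySem.Dict.getD (PySem.Dict.insert counts c (PySem.Dict.getD counts c 0 + 1)) c 0 = 1 then distinct + 1 else distinct) - 1
                   else (if PySem.Dict.getD (PySem.Dict.insert counts c (PySem.Dict.getD counts c 0 + 1)) c 0 = 1 then distinct + 1 else distinct))
                else (PySem.Dict.insert counts c (PySem.Dict.getD counts c 0 + 1),
                      if PySem.Dict.getD (PySem.Dict.insert counts c (PySem.Dict.getD counts c 0 + 1)) c 0 = 1 then distinct + 1 else distinct)) →
          (∀ x, PySem.Dict.getD st.1 x 0 = ((w'.count x : Nat) : Int)) ∧ st.2 = ((w'.toFinset.card : Nat) : Int) := by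
        intro st hst
        by_cases hkj : K ≤ j
        · rw [if_pos hkj] at hst
          have hwc : w ++ [c] = (l[j-K]'(by omega)) :: w' := (pvWin_succ_ge l K j h hK hkj).symm
          set d := l[j-K]'(by omega : j - K < l.length) with hd
          have hcd : ∀ x, PySem.Dict.getD (PySem.Dict.insert (PySem.Dict.insert counts c (PySem.Dict.getD counts c 0 + 1)) d
              (PySem.Dict.getD (PySem.Dict.insert counts c (PySem.Dict.getD counts c 0 + 1)) d 0 - 1)) x 0
              = ((w'.count x : Nat) : Int) := by
            intro x
            rw [PySem.Dict.getD_insert]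
            by_cases hx : x = d
            · rw [if_pos hx, hc1 d, hwc, hx, List.count_cons_self]
              push_cast; ring
            · rw [if_neg hx, hc1 x, hwc, List.count_cons_of_ne (show d ≠ x from fun hh => hx hh.symm)]
          have hcard : (w ++ [c]).toFinset.card = w'.toFinset.card + (if d ∈ w' then 0 else 1) := by
            rw [hwc, pvCard_cons]
          constructor
          · rw [hst]; exact hcd
          · rw [hst]
            simp only
            rw [hcd d, hd1, hcard]
            by_cases hdw : d ∈ w'
            · have h1 : 0 < w'.count d := List.count_pos_iff.mpr hdw
              have hne : ¬ (((w'.count d : Nat) : Int) = 0) := by omega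
              rw [if_neg hne, if_pos hdw]
              omega
            · have h0 : w'.count d = 0 := List.count_eq_zero.mpr hdw
              have hpos : (((w'.count d : Nat) : Int) = 0) := by omega
              rw [if_pos hpos, if_neg hdw]
              omega
        · rw [if_neg hkj] at hst
          have hwc : w' = w ++ [c] := pvWin_succ_lt l K j h (by omega)
          constructor
          · rw [hst]; intro x; rw [hwc]; exact hc1 x
          · rw [hst]; simp only; rw [hwc]; exact hd1
      dsimp only
      obtain ⟨H1, H2⟩ := hstep _ rfl
      rw [H2]
      by_cases hgood : K ≤ j + 1 ∧ w'.toFinset.card = K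
      · rw [if_pos (show K ≤ j + 1 ∧ ((w'.toFinset.card : Nat) : Int) = (K : Int) from
          ⟨hgood.1, by exact_mod_cast hgood.2⟩)]
        rw [solveALoop, if_pos (show j + 1 - K < l.length by omega)]
        rw [PySem.List.slice_natCast_add]
        rw [show (l.drop (j + 1 - K)).take K = w' from (pvWin_eq_slice l K j hgood.1).symm]
        rw [if_pos (show ((PySem.Dict.counter w').size : Int) = (K : Int) from by
          rw [pvCounterSize w', hgood.2])]
        omega
      · rw [if_neg (show ¬ (K ≤ j + 1 ∧ ((w'.toFinset.card : Nat) : Int) = (K : Int)) from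
          fun hcon => hgood ⟨hcon.1, by exact_mod_cast hcon.2⟩)]
        have hrec := ih (l.length - (j+1)) (by omega) (j+1) rfl _ _ H1 rfl
        rw [hrec]
        by_cases hk1 : K ≤ j + 1
        · conv_rhs => rw [solveALoop]
          rw [if_pos (show j + 1 - K < l.length by omega)]
          rw [PySem.List.slice_natCast_add]
          rw [show (l.drop (j + 1 - K)).take K = w' from (pvWin_eq_slice l K j hk1).symm]
          rw [if_neg (show ¬ ((PySem.Dict.counter w').size : Int) = (K : Int) from by
            rw [pvCounterSize w']
            intro hcon
            exact hgood ⟨hk1, by exact_mod_cast hcon⟩)]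
          congr 1
          omega
        · congr 1
          omega

-- A called with num_distinct = 0 matches the empty slice at i = 0 immediately and returns 0
lemma solveALoop_zero (l : List Char) : solveALoop l 0 0 = 0 := by
  rw [solveALoop]
  by_cases h : 0 < l.length
  · rw [if_pos h]
    dsimp only
    rw [show ((0:Nat):Int) + 0 = ((0:Nat):Int) from by ring]
    rw [show PySem.List.slice l (some ((0:Nat):Int)) (some ((0:Nat):Int)) = ([] : List Char) from by
      simp [PySem.List.slice_to]]
    rw [if_pos (show ((PySem.Dict.counter ([] : List Char)).size : Int) = 0 from rfl)]
    simp
  · rw [if_neg h]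

theorem solve_py_spec : Claim_equal_solve_py := by
  unfold Claim_equal_solve_py Spec_solve_py
  intro data k _
  unfold solve_py solve_py_alt
  by_cases hk : k ≤ 0
  · rw [if_pos hk]
    rcases eq_or_lt_of_le hk with he | hlt
    · rw [he]
      exact solveALoop_zero data.toList
    · exact solveALoop_neg data.toList k hlt 0
  · rw [if_neg hk]
    have hrw := solveBLoop_eq data.toList k.toNat (by omega) 0 PySem.Dict.empty 0
      (by intro x; rw [show pvWin data.toList k.toNat 0 = [] from by unfold pvWin; simp]
          simp [PySem.Dict.getD_empty])
      (by rw [show pvWin data.toList k.toNat 0 = [] from by unfold pvWin; simp]; simp)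
    rw [hrw, show 0 + 1 - k.toNat = 0 by omega]
    congr 1
    omega
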